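/- GENERATED by farm/mkstatement.py from design/units.tsv (unit `DGifGetExtension.E`) and the assertions of Gif/Spec/Seg_DGifGetExtension.lean — do not edit.
   THE STATEMENT of the proof unit `DGifGetExtension.E`: segment E of `DGifGetExtension` (9 instructions; entries 0x109afb;
   exits ret; ranges 0x109afb-0x109b16)
   takes each of its entry assertions to one of its exit assertions (`Gif.Spec.DGifGetExtension.SegE`), given the contracts of its callees.
   What the names mean: ProgX/Base/Spec/Basic.lean (the shared hypotheses), Gif/Spec/Seg_DGifGetExtension.lean (the assertions). The theorem to prove:
   `theorem DGifGetExtension_E_ok : Gif.Spec.DGifGetExtension_E.Statement`. -/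
import Gif.Code
import Gif.Dec.All
import Gif.Labels
import Gif.Spec.Seg_DGifGetExtension
namespace Gif.Spec.DGifGetExtension_E
open X86 X86.User Asan

/-- The statement of unit `DGifGetExtension.E`. -/
def Statement : Prop :=
  ∀ (Lay : Layout) (_hLay : Lay.hi = 0x1000000) (μ : Microarch) (_hμ : UserX.MicroOK μ) (u₀ : State)
    (_hcode : HasCodeNat Lay u₀ Gif.L.DGifGetExtension.entry Gif.Code.code_DGifGetExtension.nat Gif.L.DGifGetExtension.size),
    Gif.Spec.DGifGetExtension.SegE Lay μ u₀

end Gif.Spec.DGifGetExtension_E
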